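-- pv_equiv track=rewrite | github.com/ExaltedMags/roqson-core | scripts/extract_backup_scripts.py | rows_to_docs
-- ===== SOURCE A (Python) =====
-- def rows_to_docs(columns: list[str], rows: list[list[str | None]]) -> list[dict[str, str | None]]:
--     docs: list[dict[str, str | None]] = []
--     for row in rows:
--         if len(row) != len(columns):
--             # Keep parsing resilient by trimming/padding rather than crashing.
--             if len(row) < len(columns):
--                 row = row + [None] * (len(columns) - len(row))
--             else:
--                 row = row[: len(columns)]
--         docs.append(dict(zip(columns, row)))
--     return docs
-- ===== SOURCE B (Python) =====
-- def rows_to_docs(columns: list[str], rows: list[list[str | None]]) -> list[dict[str, str | None]]: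
--     # Column-major: fill the output docs one column at a time instead of one row at a time.
--     docs: list[dict[str, str | None]] = [{} for _ in rows]
--     for j, col in enumerate(columns):
--         for doc, row in zip(docs, rows):
--             doc[col] = row[j] if j < len(row) else None
--     return docs
-- ===== Notes on version B (the rewrite author's own statement) =====
-- stated objective: alternative
-- what changed: Traverses the data column-major: pre-allocates one empty dict per row and, for each column in turn, writes that column's cell (or None when the row is short) into every row's dict, instead of A's row-major reshape-then-dict(zip); extra cells beyond the columns are simply never read, so no trim step exists.
import Mathlib
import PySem

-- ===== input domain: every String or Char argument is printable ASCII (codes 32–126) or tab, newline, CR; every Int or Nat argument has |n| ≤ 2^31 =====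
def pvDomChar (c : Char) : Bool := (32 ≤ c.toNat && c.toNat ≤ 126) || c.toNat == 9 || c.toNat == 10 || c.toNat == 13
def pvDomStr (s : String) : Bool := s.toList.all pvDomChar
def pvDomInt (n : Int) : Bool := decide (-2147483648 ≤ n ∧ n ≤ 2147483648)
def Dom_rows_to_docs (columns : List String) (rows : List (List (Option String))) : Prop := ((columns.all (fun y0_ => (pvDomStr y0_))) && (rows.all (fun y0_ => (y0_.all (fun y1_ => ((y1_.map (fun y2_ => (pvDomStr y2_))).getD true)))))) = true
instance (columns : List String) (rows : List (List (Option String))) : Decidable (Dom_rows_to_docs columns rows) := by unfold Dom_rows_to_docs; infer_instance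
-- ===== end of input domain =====

-- ===== PORT A =====
-- B traverses column-major (fills all docs one column at a time); same return value, no side effects.
-- A: row-major — reshape each row (pad with None / trim) to the column count, then dict(zip(columns, row)).
def pvRowDictA (columns : List String) (row : List (Option String)) : PySem.Dict String (Option String) :=
  let row' :=
    if row.length ≠ columns.length then
      if row.length < columns.length then
        row ++ List.replicate (columns.length - row.length) none
      else
        PySem.List.slice row none (some (columns.length : Int))
    else row
  PySem.Dict.ofList (columns.zip row')

def rows_to_docs (columns : List String) (rows : List (List (Option String))) : List (List (String × Option String)) :=
  rows.foldl (fun docs row => docs ++ [(pvRowDictA columns row).items]) []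

-- ===== PORT B =====
-- B: docs = one empty dict per row; for each (j, col) in enumerate(columns), set doc[col] = row[j] if j < len(row) else None for every (doc, row).
def rows_to_docs_alt (columns : List String) (rows : List (List (Option String))) : List (List (String × Option String)) :=
  let docs0 : List (PySem.Dict String (Option String)) := rows.map (fun _ => PySem.Dict.empty)
  let docs := (PySem.List.enumerate columns 0).foldl
    (fun docs p => (docs.zip rows).map
      (fun q => q.1.insert p.2 (if p.1 < (q.2.length : Int) then PySem.List.pyGetD q.2 p.1 none else none)))
    docs0
  docs.map PySem.Dict.items

-- ===== PRECONDITION & SPEC =====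
def Spec_rows_to_docs (columns : List String) (rows : List (List (Option String))) (out : List (List (String × Option String))) : Prop := out = rows_to_docs_alt columns rows
instance (columns : List String) (rows : List (List (Option String))) (out : List (List (String × Option String))) : Decidable (Spec_rows_to_docs columns rows out) := by unfold Spec_rows_to_docs; infer_instance

-- ===== CLAIM (what is proved, stated in full; the proofs are below) =====
def Claim_equal_rows_to_docs : Prop := ∀ (columns : List String) (rows : List (List (Option String))), Dom_rows_to_docs columns rows → Spec_rows_to_docs columns rows (rows_to_docs columns rows)

-- ===== LEMMAS AND PROOFS =====

lemma map_zip_self {α β : Type} (g : α → β) (l : List α) :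
    (l.map g).zip l = l.map (fun x => (g x, x)) := by
  induction l with
  | nil => rfl
  | cons a t ih => simp [ih]

-- Column-major fold over rows.map g commutes to a per-row fold.
lemma fold_cols (rows : List (List (Option String))) (es : List (Int × String))
    (g : List (Option String) → PySem.Dict String (Option String)) :
    es.foldl
      (fun docs p => (docs.zip rows).map
        (fun q => q.1.insert p.2 (if p.1 < (q.2.length : Int) then PySem.List.pyGetD q.2 p.1 none else none)))
      (rows.map g)
    = rows.map (fun row =>
        es.foldl (fun d p => d.insert p.2 (if p.1 < (row.length : Int) then PySem.List.pyGetD row p.1 none else none)) (g row)) := by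
  induction es generalizing g with
  | nil => rfl
  | cons e t ih =>
    simp only [List.foldl_cons, map_zip_self, List.map_map]
    exact ih (fun row => (g row).insert e.2 (if e.1 < (row.length : Int) then PySem.List.pyGetD row e.1 none else none))

-- A's reshaped row and B's per-index lookup produce the same (key, value) pair list.
lemma zip_padTrim_eq_map_enumerate (columns : List String) (row : List (Option String)) :
    columns.zip
      (if row.length ≠ columns.length then
        if row.length < columns.length then
          row ++ List.replicate (columns.length - row.length) none
        else
          PySem.List.slice row none (some (columns.length : Int))
      else row)
    = (PySem.List.enumerate columns 0).map
        (fun p => (p.2, if p.1 < (row.length : Int) then PySem.List.pyGetD row p.1 none else none)) := by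
  rw [PySem.List.slice_to_natCast]
  apply List.ext_getElem
  · split_ifs <;> simp [PySem.List.length_enumerate, Nat.min_def] <;> omega
  · intro i h1 h2
    have hic : i < columns.length := by
      simpa [PySem.List.length_enumerate] using h2
    simp only [List.getElem_map, PySem.List.getElem_enumerate, List.getElem_zip]
    by_cases hir : i < row.length
    · have hc : ((i : Int) < (row.length : Int)) := by exact_mod_cast hir
      simp only [zero_add, hc, if_true, PySem.List.pyGetD_natCast,
        List.getD_eq_getElem?_getD, List.getElem?_eq_getElem hir, Option.getD_some]
      by_cases h : row.length = columns.length
      · simp [h]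
      · by_cases hl : row.length < columns.length
        · simp [h, hl, hir]
        · simp [h, hl, List.getElem_take]
    · have hc : ¬ ((i : Int) < (row.length : Int)) := by exact_mod_cast hir
      have hlt : row.length < columns.length := by omega
      have hne : row.length ≠ columns.length := by omega
      simp [hne, hlt, List.getElem_append, hir, hc]

lemma rowDict_eq (columns : List String) (row : List (Option String)) :
    pvRowDictA columns row
    = (PySem.List.enumerate columns 0).foldl
        (fun d p => d.insert p.2 (if p.1 < (row.length : Int) then PySem.List.pyGetD row p.1 none else none))
        PySem.Dict.empty := by
  simp only [pvRowDictA]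
  rw [zip_padTrim_eq_map_enumerate]
  show (List.map (fun p : Int × String => (p.2, if p.1 < (row.length : Int) then PySem.List.pyGetD row p.1 none else none)) (PySem.List.enumerate columns 0)).foldl
      (fun d p => d.insert p.1 p.2) PySem.Dict.empty = _
  rw [List.foldl_map]

-- ===== VERDICT (by name: the statement is the Claim_ definition above) =====
theorem rows_to_docs_spec : Claim_equal_rows_to_docs := by
  intro columns rows _
  unfold Spec_rows_to_docs rows_to_docs rows_to_docs_alt
  rw [PySem.List.foldl_append_singleton_eq_map, List.nil_append]
  show List.map (fun row => (pvRowDictA columns row).items) rows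
      = List.map PySem.Dict.items
        ((PySem.List.enumerate columns 0).foldl
          (fun docs p => (docs.zip rows).map
            (fun q => q.1.insert p.2 (if p.1 < (q.2.length : Int) then PySem.List.pyGetD q.2 p.1 none else none)))
          (rows.map (fun _ => PySem.Dict.empty)))
  rw [fold_cols, List.map_map]
  exact List.map_congr_left (fun row _ => by rw [rowDict_eq]; rfl)
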